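-- pv_equiv track=rewrite | github.com/Diegocuadros1/Auto-Affeliate-Pinterest | create/creating_poster.py | shorten_string
-- ===== SOURCE A (Python) =====
-- def shorten_string(string):
--     temp = ""
--     for char in string:
--         #replacing spaces for _
--         if char == ' ':
--             char = '_'
--
--         #ending name once a , or a - is noticed
--         if char == ',' or char == '-':
--             return temp
--         temp += char
--
--     #if no - or , is found, return the first 25 words
--     return string[:25]
-- ===== SOURCE B (Python) =====
-- def shorten_string(string):
--     p1 = string.find(',')
--     p2 = string.find('-')
--     cuts = [p for p in (p1, p2) if p != -1]
--     if not cuts: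
--         return string[:25]
--     return ''.join('_' if c == ' ' else c for c in string[:min(cuts)])
-- ===== Notes on version B (the rewrite author's own statement) =====
-- stated objective: simpler
-- what changed: Replaces A's character-by-character accumulating loop (with early return) by computing the earliest of string.find(',') and string.find('-') and then slicing and mapping spaces to underscores in one expression; the no-separator fall-through returns string[:25] untouched, as in A.
import Mathlib
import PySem

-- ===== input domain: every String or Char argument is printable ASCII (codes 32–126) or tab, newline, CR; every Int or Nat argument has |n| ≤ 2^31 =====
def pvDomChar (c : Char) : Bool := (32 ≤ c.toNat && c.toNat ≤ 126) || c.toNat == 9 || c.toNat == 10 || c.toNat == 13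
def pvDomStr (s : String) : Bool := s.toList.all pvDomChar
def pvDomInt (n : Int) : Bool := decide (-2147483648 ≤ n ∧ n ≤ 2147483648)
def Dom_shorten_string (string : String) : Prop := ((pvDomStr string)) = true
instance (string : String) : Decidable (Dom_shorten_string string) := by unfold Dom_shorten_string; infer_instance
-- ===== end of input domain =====

-- B replaces A's character-by-character accumulating loop by find-the-earliest-separator + slice + map (simpler decomposition, same O(n) cost).


-- ===== PORT A =====
-- A's loop: build temp (spaces turned to '_'), early-return temp at the first ',' or '-'
-- (some temp = the early return, none = the loop fell through).
def pvALoop : List Char → List Char → Option (List Char)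
  | [], _ => none
  | c :: rest, temp =>
    let c' := if c = ' ' then '_' else c
    if c' = ',' ∨ c' = '-' then some temp
    else pvALoop rest (temp ++ [c'])

def shorten_string (string : String) : String :=
  match pvALoop string.toList [] with
  | some temp => String.mk temp
  | none => String.mk (PySem.Chars.slice string.toList none (some 25))   -- string[:25]

-- ===== PORT B =====
-- p1 = string.find(','), p2 = string.find('-'); cuts = the ones present; if none: string[:25],
-- else ''.join('_' if c == ' ' else c for c in string[:min(cuts)])  (the join of the
-- one-character pieces is exactly the mapped character list).
def shorten_string_alt (string : String) : String :=
  let l := string.toList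
  let p1 := PySem.Chars.find l [',']
  let p2 := PySem.Chars.find l ['-']
  let cuts := [p1, p2].filter (fun p => p != -1)
  match PySem.List.min? cuts (fun p => p) with
  | none => String.mk (PySem.Chars.slice l none (some 25))
  | some i => String.mk ((PySem.Chars.slice l none (some i)).map (fun c => if c = ' ' then '_' else c))

-- ===== PRECONDITION & SPEC =====
def Spec_shorten_string (string : String) (out : String) : Prop := out = shorten_string_alt string
instance (string : String) (out : String) : Decidable (Spec_shorten_string string out) := by unfold Spec_shorten_string; infer_instance

-- ===== CLAIM (what is proved, stated in full; the proofs are below) =====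
def Claim_equal_shorten_string : Prop := ∀ (string : String), Dom_shorten_string string → Spec_shorten_string string (shorten_string string)

-- ===== LEMMAS AND PROOFS =====
def pvSep (c : Char) : Bool := c == ',' || c == '-'

theorem pv_loop_char (l : List Char) : ∀ temp, pvALoop l temp =
    if List.findIdx pvSep l < l.length then
      some (temp ++ (l.take (List.findIdx pvSep l)).map (fun c => if c = ' ' then '_' else c))
    else none := by
  induction l with
  | nil => intro temp; simp [pvALoop]
  | cons c rest ih =>
    intro temp
    have hs : ((if c = ' ' then '_' else c) = ',' ∨ (if c = ' ' then '_' else c) = '-') ↔ pvSep c = true := by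
      by_cases h : c = ' ' <;> simp [h, pvSep]
    by_cases hc : pvSep c = true
    · simp [pvALoop, hs.mpr hc, List.findIdx_cons, hc]
    · have hc' : ¬ ((if c = ' ' then '_' else c) = ',' ∨ (if c = ' ' then '_' else c) = '-') := by
        intro h; exact hc (hs.mp h)
      simp only [pvALoop, hc', if_false, List.findIdx_cons]
      rw [ih]
      have hcb : pvSep c = false := by simpa using hc
      simp [hcb, List.take_succ_cons]

theorem pv_singleton_prefix (c : Char) (t : List Char) : [c] <+: t ↔ t.head? = some c := by
  cases t with
  | nil => simp
  | cons b ts => simp [List.cons_prefix_cons, eq_comm]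

theorem pv_find_char (l : List Char) (c : Char) :
    PySem.Chars.find l [c] = -1 ∨
      (0 ≤ PySem.Chars.find l [c] ∧ l[(PySem.Chars.find l [c]).toNat]? = some c ∧
        ∀ i < (PySem.Chars.find l [c]).toNat, l[i]? ≠ some c) := by
  have hle := PySem.Chars.neg_one_le_find (s := l) (sub := [c])
  by_cases h : PySem.Chars.find l [c] = -1
  · exact Or.inl h
  · have h0 : 0 ≤ PySem.Chars.find l [c] := by omega
    obtain ⟨h1, h2⟩ := PySem.Chars.find_spec h0
    refine Or.inr ⟨h0, ?_, ?_⟩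
    · have := (pv_singleton_prefix c _).mp h1
      simpa [List.head?_drop] using this
    · intro i hi hmem
      exact h2 i hi ((pv_singleton_prefix c _).mpr (by simpa [List.head?_drop] using hmem))

theorem pv_find_neg_one (l : List Char) (c : Char) (h : c ∉ l) : PySem.Chars.find l [c] = -1 := by
  rw [PySem.Chars.find_eq_neg_one_iff]
  intro hinf
  exact h (List.singleton_sublist.mp hinf.sublist)

theorem pv_mem_infix (c : Char) (l : List Char) (h : c ∈ l) : [c] <:+: l := by
  obtain ⟨s, t, rfl⟩ := List.append_of_mem h
  exact ⟨s, t, by simp⟩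

theorem pv_findIdx_le (l : List Char) (i : Nat) (c : Char) (hc : pvSep c = true)
    (h : l[i]? = some c) : List.findIdx pvSep l ≤ i := by
  induction l generalizing i with
  | nil => simp at h
  | cons b t ih =>
    rw [List.findIdx_cons]
    cases i with
    | zero =>
      simp only [List.getElem?_cons_zero, Option.some.injEq] at h
      simp [h, hc]
    | succ j =>
      simp only [List.getElem?_cons_succ] at h
      by_cases hb : pvSep b = true
      · simp [hb]
      · rw [Bool.not_eq_true] at hb
        simp only [hb, cond_false]
        exact Nat.succ_le_succ (ih j h)

-- ===== VERDICT (by name: the statement is the Claim_ definition above) =====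
theorem shorten_string_spec : Claim_equal_shorten_string := by
  intro string _
  unfold Spec_shorten_string shorten_string shorten_string_alt
  set l := string.toList with hl
  set k := List.findIdx pvSep l with hk
  rw [pv_loop_char]
  by_cases hkl : k < l.length
  · -- a separator exists; it sits at index k
    have hkk : l[k]? = some l[k] := List.getElem?_eq_getElem hkl
    have hsepk : pvSep l[k] = true := List.findIdx_getElem (w := hkl)
    have hcases : l[k] = ',' ∨ l[k] = '-' := by simpa [pvSep] using hsepk
    -- facts about the two finds
    have f1 := pv_find_char l ','
    have f2 := pv_find_char l '-'
    -- whichever char sits at k, its find equals k; the other find is -1 or ≥ k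
    have hmin : PySem.List.min? ([PySem.Chars.find l [','], PySem.Chars.find l ['-']].filter
        (fun p => p != -1)) (fun p => p) = some ((k : Nat) : Int) := by
      rcases hcases with hck | hck
      · -- ',' at k
        rcases f1 with h1 | ⟨h1n, h1g, h1m⟩
        · exact absurd (pv_mem_infix ',' l (List.mem_of_getElem? (hck ▸ hkk)))
            ((PySem.Chars.find_eq_neg_one_iff l [',']).mp h1)
        · have hf1k : (PySem.Chars.find l [',']).toNat = k := by
            have hle1 : (PySem.Chars.find l [',']).toNat ≤ k := by
              by_contra hgt
              push Not at hgt
              exact h1m k (by omega) (hck ▸ hkk)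
            have hle2 : k ≤ (PySem.Chars.find l [',']).toNat := pv_findIdx_le l _ ',' (by decide) h1g
            omega
          have hf1 : PySem.Chars.find l [','] = ((k : Nat) : Int) := by omega
          rcases f2 with h2 | ⟨h2n, h2g, h2m⟩
          · simp [h2, hf1, PySem.List.min?, List.filter, show (((k:Nat):Int) != -1) = true by simp only [bne_iff_ne, ne_eq]; omega]
          · have hge : k ≤ (PySem.Chars.find l ['-']).toNat := pv_findIdx_le l _ '-' (by decide) h2g
            have hnlt : ¬ PySem.Chars.find l ['-'] < ((k : Nat) : Int) := by omega
            simp [PySem.List.min?, List.filter, hf1,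
              show (((k:Nat):Int) != -1) = true by simp only [bne_iff_ne, ne_eq]; omega,
              show ((PySem.Chars.find l ['-']) != -1) = true by simp only [bne_iff_ne, ne_eq]; omega, hnlt]
      · -- '-' at k
        rcases f2 with h2 | ⟨h2n, h2g, h2m⟩
        · exact absurd (pv_mem_infix '-' l (List.mem_of_getElem? (hck ▸ hkk)))
            ((PySem.Chars.find_eq_neg_one_iff l ['-']).mp h2)
        · have hf2k : (PySem.Chars.find l ['-']).toNat = k := by
            have hle1 : (PySem.Chars.find l ['-']).toNat ≤ k := by
              by_contra hgt
              push Not at hgt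
              exact h2m k (by omega) (hck ▸ hkk)
            have hle2 : k ≤ (PySem.Chars.find l ['-']).toNat := pv_findIdx_le l _ '-' (by decide) h2g
            omega
          have hf2 : PySem.Chars.find l ['-'] = ((k : Nat) : Int) := by omega
          rcases f1 with h1 | ⟨h1n, h1g, h1m⟩
          · simp [h1, hf2, PySem.List.min?, List.filter, show (((k:Nat):Int) != -1) = true by simp only [bne_iff_ne, ne_eq]; omega]
          · have hge : k ≤ (PySem.Chars.find l [',']).toNat := pv_findIdx_le l _ ',' (by decide) h1g
            have hne : (PySem.Chars.find l [',']).toNat ≠ k := by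
              intro he
              have := h1g
              rw [he, hkk] at this
              simp only [Option.some.injEq] at this
              rw [hck] at this
              exact absurd this (by decide)
            have hlt : ((k : Nat) : Int) < PySem.Chars.find l [','] := by omega
            simp [PySem.List.min?, List.filter, hf2,
              show (((k:Nat):Int) != -1) = true by simp only [bne_iff_ne, ne_eq]; omega,
              show ((PySem.Chars.find l [',']) != -1) = true by simp only [bne_iff_ne, ne_eq]; omega, hlt]
    have hslice : PySem.Chars.slice l none (some ((k : Nat) : Int)) = l.take k := by
      rw [PySem.Chars.slice_eq_listSlice, PySem.List.slice_to_natCast]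
    simp only [hmin, hslice]
    rw [← hk, if_pos hkl]
    simp
  · -- no separator: both finds are -1, cuts is empty
    have hall : ∀ x ∈ l, pvSep x = false := by
      have hlen := List.findIdx_le_length (p := pvSep) (xs := l)
      exact List.findIdx_eq_length.mp (by omega)
    have h1 : PySem.Chars.find l [','] = -1 :=
      pv_find_neg_one l ',' (fun hm => by simpa [pvSep] using hall ',' hm)
    have h2 : PySem.Chars.find l ['-'] = -1 :=
      pv_find_neg_one l '-' (fun hm => by simpa [pvSep] using hall '-' hm)
    rw [← hk, if_neg hkl]
    simp [h1, h2, PySem.List.min?, List.filter]
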